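-- pv_equiv track=rewrite | github.com/cassiewilliam/vllm-oss | vllm/utils.py | coalesce_blocks
-- ===== SOURCE A (Python) =====
-- from typing import Dict, List
--
-- def coalesce_blocks(block_list: List[int]):
--     '''Coalesce of list of blocks to exploit contiguous chunks.
--     '''
--     if not block_list:
--         return []
--     sorted_block_list = sorted(block_list)
--     ret = []
--     current_block_start = sorted_block_list[0]
--     current_block_length = 1
--     for i in range(1, len(sorted_block_list)):
--         if sorted_block_list[i] == sorted_block_list[i - 1] + 1:
--             current_block_length += 1
--         else:
--             ret.append((current_block_start, current_block_length))
--             current_block_start = sorted_block_list[i]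
--             current_block_length = 1
--     ret.append((current_block_start, current_block_length))
--     return ret
-- ===== SOURCE B (Python) =====
-- def coalesce_blocks(block_list):
--     '''Coalesce of list of blocks to exploit contiguous chunks.
--     (B: boundary-index method — list the sorted indices where a new run
--     begins, pair each boundary with the next, and read off (start, length).)'''
--     s = sorted(block_list)
--     starts = [i for i in range(len(s)) if i == 0 or s[i] != s[i - 1] + 1]
--     ends = starts[1:] + [len(s)]
--     return [(s[b], e - b) for b, e in zip(starts, ends)]
-- ===== Notes on version B (the rewrite author's own statement) =====
-- stated objective: alternative
-- what changed: A scans the sorted list carrying mutable current-run start/length state with an empty-list guard and a final append; B instead first builds the list of boundary indices where a run begins, then zips each boundary with the next one to read off (start, length) pairs, with no run state and no guards.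
import Mathlib
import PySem

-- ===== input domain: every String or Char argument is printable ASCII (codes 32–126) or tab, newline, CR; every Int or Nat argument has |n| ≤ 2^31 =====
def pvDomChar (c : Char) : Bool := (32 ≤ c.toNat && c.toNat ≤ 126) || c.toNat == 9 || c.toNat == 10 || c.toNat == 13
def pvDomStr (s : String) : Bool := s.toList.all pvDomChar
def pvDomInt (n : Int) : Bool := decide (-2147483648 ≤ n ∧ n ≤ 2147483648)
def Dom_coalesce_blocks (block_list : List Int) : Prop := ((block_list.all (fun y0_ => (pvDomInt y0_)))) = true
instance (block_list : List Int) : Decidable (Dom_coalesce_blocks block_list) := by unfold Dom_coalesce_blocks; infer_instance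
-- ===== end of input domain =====

-- B replaces A's stateful run-merging scan by a boundary-index method: it lists the
-- indices where a new run begins and pairs consecutive boundaries to read off
-- (start, length); alternative decomposition, same O(n log n) cost.


-- ===== PORT A =====
-- A's for-loop over range(1, len(s)) compares s[i] with s[i-1]: transcribed as a
-- structural recursion over the tail carrying the same state (ret, start, length)
-- plus the previous element s[i-1].
def pvALoop (ret : List (Int × Int)) (start len prev : Int) :
    List Int → (List (Int × Int)) × Int × Int
  | [] => (ret, start, len)
  | x :: xs =>
      if x = prev + 1 then
        pvALoop ret start (len + 1) x xs
      else
        pvALoop (ret ++ [(start, len)]) x 1 x xs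

def coalesce_blocks (block_list : List Int) : List (Int × Int) :=
  if block_list = [] then []
  else
    match PySem.List.sorted block_list (fun x => x) false with
    | [] => []  -- unreachable: sorted of a nonempty list is nonempty
    | h :: t =>
      let (ret, start, len) := pvALoop [] h 1 h t
      ret ++ [(start, len)]

-- ===== PORT B =====
-- literal transliteration of Source B: sort, collect the boundary indices where a new
-- run starts, pair each boundary with the next one (or len(s)), emit (s[b], e-b).
def coalesce_blocks_alt (block_list : List Int) : List (Int × Int) :=
  let s := PySem.List.sorted block_list (fun x => x) false
  let starts := (List.range s.length).filter
      (fun i => i == 0 || !(s.getD i 0 == s.getD (i - 1) 0 + 1))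
  let ends := starts.drop 1 ++ [s.length]
  (starts.zip ends).map (fun p => (s.getD p.1 0, (p.2 : Int) - (p.1 : Int)))

-- ===== PRECONDITION & SPEC =====
def Spec_coalesce_blocks (block_list : List Int) (out : List (Int × Int)) : Prop := out = coalesce_blocks_alt block_list
instance (block_list : List Int) (out : List (Int × Int)) : Decidable (Spec_coalesce_blocks block_list out) := by unfold Spec_coalesce_blocks; infer_instance

-- ===== CLAIM (what is proved, stated in full; the proofs are below) =====
def Claim_equal_coalesce_blocks : Prop := ∀ (block_list : List Int), Dom_coalesce_blocks block_list → Spec_coalesce_blocks block_list (coalesce_blocks block_list)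

-- ===== LEMMAS AND PROOFS =====

-- middle-ground specification: the runs of a list, given an open run (start, len)
def runsFrom (start len : Int) : List Int → List (Int × Int)
  | [] => [(start, len)]
  | x :: xs => if x = start + len then runsFrom start (len + 1) xs
               else (start, len) :: runsFrom x 1 xs

-- A's loop state (ret, start, len, prev = start+len-1) accumulates ret ++ runsFrom
theorem pvALoop_runs (t : List Int) : ∀ (ret : List (Int × Int)) (start len : Int),
    (pvALoop ret start len (start + len - 1) t).1 ++
        [((pvALoop ret start len (start + len - 1) t).2.1,
          (pvALoop ret start len (start + len - 1) t).2.2)] =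
      ret ++ runsFrom start len t := by
  induction t with
  | nil => intro ret start len; simp [pvALoop, runsFrom]
  | cons x xs ih =>
      intro ret start len
      by_cases hx : x = (start + len - 1) + 1
      · have hx' : x = start + len := by omega
        have h2 := ih ret start (len + 1)
        rw [show start + (len + 1) - 1 = x by omega] at h2
        simp only [pvALoop, if_pos hx, runsFrom, if_pos hx']
        exact h2
      · have hx' : ¬ x = start + len := by omega
        have h2 := ih (ret ++ [(start, len)]) x 1
        rw [show x + 1 - 1 = x by omega] at h2
        simp only [pvALoop, if_neg hx, runsFrom, if_neg hx']
        simpa using h2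

-- two open runs ending at the same next value produce the same runs up to the head
theorem runsFrom_shift (t : List Int) : ∀ (a b la lb : Int), a + la = b + lb →
    ∃ v r, runsFrom b lb t = (b, v) :: r ∧ runsFrom a la t = (a, v + la - lb) :: r := by
  induction t with
  | nil =>
      intro a b la lb h
      refine ⟨lb, [], rfl, ?_⟩
      simp only [runsFrom]
      congr 2
      omega
  | cons x xs ih =>
      intro a b la lb h
      by_cases hx : x = b + lb
      · have hx' : x = a + la := by omega
        obtain ⟨v, r, h1, h2⟩ := ih a b (la + 1) (lb + 1) (by omega)
        refine ⟨v, r, ?_, ?_⟩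
        · simp only [runsFrom, if_pos hx]; exact h1
        · simp only [runsFrom, if_pos hx']; rw [h2]; congr 2; omega
      · have hx' : ¬ x = a + la := by omega
        exact ⟨lb, runsFrom x 1 xs, by simp only [runsFrom, if_neg hx],
          by simp only [runsFrom, if_neg hx']; congr 2; omega⟩

-- the boundary-index list of the tail: indices j of ys with ys[j] != (prev::ys)[j] + 1
def Tf (prev : Int) (ys : List Int) : List Nat :=
  (List.range ys.length).filter (fun j => !(ys.getD j 0 == (prev :: ys).getD j 0 + 1))

theorem Tf_nil (prev : Int) : Tf prev [] = [] := rfl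

theorem Tf_cons (prev y : Int) (ys : List Int) :
    Tf prev (y :: ys) =
      (if y = prev + 1 then [] else [0]) ++ (Tf y ys).map (· + 1) := by
  unfold Tf
  rw [List.length_cons, List.range_succ_eq_map, List.filter_cons, List.filter_map]
  have hs : (List.range ys.length).filter
      ((fun j => !((y :: ys).getD j 0 == (prev :: y :: ys).getD j 0 + 1)) ∘ (· + 1)) =
      (List.range ys.length).filter
        (fun j => !(ys.getD j 0 == (y :: ys).getD j 0 + 1)) := by
    apply List.filter_congr
    intro j _
    simp
  by_cases h : y = prev + 1
  · rw [if_neg (by simp [h])]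
    rw [hs, if_pos h]
    rfl
  · rw [if_pos (by simp; exact fun hh => absurd hh h)]
    rw [hs, if_neg h]
    rfl

-- B's starts list for a nonempty sorted list is 0 :: (Tf head tail).map (+1)
theorem starts_cons (x : Int) (xs : List Int) :
    (List.range (x :: xs).length).filter
        (fun i => i == 0 || !((x :: xs).getD i 0 == (x :: xs).getD (i - 1) 0 + 1)) =
      0 :: (Tf x xs).map (· + 1) := by
  rw [List.length_cons, List.range_succ_eq_map, List.filter_cons]
  rw [if_pos (by simp), List.filter_map]
  refine congrArg (List.cons 0) (congrArg (List.map (· + 1)) ?_)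
  unfold Tf
  apply List.filter_congr
  intro j _
  simp

-- emission of the zipped boundary pairs, written as a recursion
def emitFrom (s : List Int) (b : Nat) (bs : List Nat) (fin : Nat) : List (Int × Int) :=
  match bs with
  | [] => [(s.getD b 0, (fin : Int) - (b : Int))]
  | e :: rest => (s.getD b 0, (e : Int) - (b : Int)) :: emitFrom s e rest fin

theorem zip_emit (bs : List Nat) : ∀ (s : List Int) (b fin : Nat),
    ((b :: bs).zip (bs ++ [fin])).map
        (fun p => (s.getD p.1 0, (p.2 : Int) - (p.1 : Int))) =
      emitFrom s b bs fin := by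
  induction bs with
  | nil => intro s b fin; rfl
  | cons e rest ih =>
      intro s b fin
      simp only [List.cons_append, List.zip_cons_cons, List.map_cons, emitFrom]
      rw [ih]

-- consing one element shifts every index and the final bound by one
theorem emitFrom_shift (bs : List Nat) : ∀ (s : List Int) (z : Int) (b fin : Nat),
    emitFrom (z :: s) (b + 1) (bs.map (· + 1)) (fin + 1) = emitFrom s b bs fin := by
  induction bs with
  | nil =>
      intro s z b fin
      simp only [List.map_nil, emitFrom, List.getD_cons_succ]
      congr 1
      push_cast
      ring_nf
  | cons e rest ih =>
      intro s z b fin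
      simp only [List.map_cons, emitFrom, List.getD_cons_succ]
      rw [ih]
      congr 1
      push_cast
      ring_nf

-- main correspondence: emission over boundary indices equals the run recursion
theorem emit_runs (xs : List Int) : ∀ (x : Int),
    emitFrom (x :: xs) 0 ((Tf x xs).map (· + 1)) (xs.length + 1) = runsFrom x 1 xs := by
  induction xs with
  | nil => intro x; simp [Tf_nil, emitFrom, runsFrom]
  | cons y ys ih =>
      intro x
      rw [Tf_cons]
      by_cases h : y = x + 1
      · -- merge: the head run of (y :: ys) grows by one
        simp only [if_pos h, List.nil_append]
        have hiy := ih y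
        obtain ⟨v, r, h1, h2⟩ := runsFrom_shift ys x y (1 + 1) 1 (by omega)
        rw [show runsFrom x 1 (y :: ys) = runsFrom x (1 + 1) ys from by
              simp only [runsFrom, if_pos (show y = x + 1 from h)]]
        rw [h2]
        rw [h1] at hiy
        cases hts : Tf y ys with
        | nil =>
            rw [hts] at hiy
            simp only [List.map_nil, emitFrom] at hiy ⊢
            injection hiy with hA hB
            have hv : ((ys.length : Int) + 1) - (0 : Int) = v := by
              have := congrArg Prod.snd hA
              push_cast at this ⊢
              omega
            rw [← hB]
            simp only [List.getD_cons_zero, List.length_cons]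
            congr 2 <;> (push_cast at hv ⊢; omega)
        | cons t0 ts =>
            rw [hts] at hiy
            simp only [List.map_cons, emitFrom] at hiy ⊢
            injection hiy with hA hB
            have hv : ((t0 : Int) + 1) - (0 : Int) = v := by
              have := congrArg Prod.snd hA
              push_cast at this ⊢
              omega
            have htail : emitFrom (x :: y :: ys) (t0 + 1 + 1) ((ts.map (· + 1)).map (· + 1))
                  (ys.length + 1 + 1) = r := by
              rw [emitFrom_shift]
              exact hB
            rw [show (y :: ys).length + 1 = ys.length + 1 + 1 from by simp]
            rw [htail]
            simp only [List.getD_cons_zero]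
            congr 2 <;> (push_cast at hv ⊢; omega)
      · -- new run: boundary 0 of the tail gives the (x, 1) head
        simp only [if_neg h, List.cons_append, List.nil_append, List.map_cons, emitFrom]
        rw [show runsFrom x 1 (y :: ys) = (x, 1) :: runsFrom y 1 ys from by
              simp only [runsFrom, if_neg (show ¬ y = x + 1 from by omega)]]
        rw [show (y :: ys).length + 1 = ys.length + 1 + 1 from by simp]
        rw [show (0 : Nat) + 1 = 0 + 1 from rfl, emitFrom_shift, ih y]
        simp

theorem sorted_ne_nil (block_list : List Int) (h : block_list ≠ []) :
    PySem.List.sorted block_list (fun x => x) false ≠ [] := by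
  intro hs
  apply h
  have := PySem.List.sorted_perm block_list (fun x : Int => x) false
  rw [hs] at this
  exact (List.Perm.nil_eq this).symm

-- ===== VERDICT (by name: the statement is the Claim_ definition above) =====
theorem coalesce_blocks_spec : Claim_equal_coalesce_blocks := by
  intro block_list _
  unfold Spec_coalesce_blocks coalesce_blocks coalesce_blocks_alt
  by_cases hb : block_list = []
  · subst hb; rfl
  · simp only [if_neg hb]
    cases hs : PySem.List.sorted block_list (fun x => x) false with
    | nil => exact absurd hs (sorted_ne_nil block_list hb)
    | cons h t =>
        simp only [starts_cons]
        rw [show (0 : Nat) :: (Tf h t).map (· + 1) =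
              (0 : Nat) :: ((Tf h t).map (· + 1)) from rfl]
        rw [List.drop_one, List.tail_cons, zip_emit, List.length_cons, emit_runs]
        have h1 : h = h + 1 - 1 := by omega
        have := pvALoop_runs t [] h 1
        rw [← h1] at this
        simpa using this
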